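-- pv_equiv track=rewrite | github.com/chllming/ti-code-analysis-agent | src/utils/redis_sse_manager.py | format_sse_message
-- ===== SOURCE A (Python) =====
-- from typing import Dict, Any, Optional, List, Set
--
-- def format_sse_message(data: str, event: Optional[str] = None) -> str:
--     """Format a message as an SSE event."""
--     message = ""
--     if event:
--         message += f"event: {event}\n"
--
--     # Split data by newlines and prefix each line with "data: "
--     for line in data.split("\n"):
--         message += f"data: {line}\n"
--
--     # End with an extra newline to complete the event
--     message += "\n"
--     return message
-- ===== SOURCE B (Python) =====
-- def format_sse_message(data: str, event=None) -> str:
--     """Format a message as an SSE event (closed-form, no per-line loop)."""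
--     prefix = f"event: {event}\n" if event else ""
--     return prefix + "data: " + data.replace("\n", "\ndata: ") + "\n\n"
-- ===== Notes on version B (the rewrite author's own statement) =====
-- stated objective: simpler
-- what changed: Replaces the split-and-accumulate loop over lines with a single closed-form str.replace that inserts the line prefix after every newline, plus one concatenation.
import Mathlib
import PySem

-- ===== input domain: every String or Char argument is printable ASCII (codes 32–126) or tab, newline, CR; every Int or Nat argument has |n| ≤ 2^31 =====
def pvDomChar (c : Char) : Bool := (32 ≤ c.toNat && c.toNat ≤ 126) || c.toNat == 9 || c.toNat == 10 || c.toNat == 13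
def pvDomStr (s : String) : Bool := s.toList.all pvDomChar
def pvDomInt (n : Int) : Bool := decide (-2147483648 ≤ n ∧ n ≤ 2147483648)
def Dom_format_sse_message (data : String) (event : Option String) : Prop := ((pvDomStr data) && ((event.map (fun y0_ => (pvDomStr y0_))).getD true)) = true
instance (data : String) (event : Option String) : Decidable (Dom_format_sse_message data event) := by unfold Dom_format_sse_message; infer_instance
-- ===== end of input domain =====

-- B replaces A's split-and-loop over lines by one closed-form str.replace; proved equal for all inputs.


-- ===== PORT A =====
-- `if event:` — true iff event is not None and not the empty string
def ssePrefix (event : Option String) : List Char :=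
  match event with
  | some e => if e.toList = [] then [] else "event: ".toList ++ e.toList ++ ['\n']
  | none => []

def format_sse_message (data : String) (event : Option String) : String :=
  let message := ssePrefix event
  let message :=
    (PySem.Chars.splitOn data.toList ['\n']).foldl
      (fun acc line => acc ++ "data: ".toList ++ line ++ ['\n']) message
  String.ofList (message ++ ['\n'])

-- ===== PORT B =====
def format_sse_message_alt (data : String) (event : Option String) : String :=
  String.ofList (ssePrefix event ++ "data: ".toList
    ++ PySem.Chars.replace data.toList ['\n'] ('\n' :: "data: ".toList)
    ++ ['\n', '\n'])

-- ===== PRECONDITION & SPEC =====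
def Spec_format_sse_message (data : String) (event : Option String) (out : String) : Prop := out = format_sse_message_alt data event
instance (data : String) (event : Option String) (out : String) : Decidable (Spec_format_sse_message data event out) := by unfold Spec_format_sse_message; infer_instance

-- ===== CLAIM (what is proved, stated in full; the proofs are below) =====
def Claim_equal_format_sse_message : Prop := ∀ (data : String) (event : Option String), Dom_format_sse_message data event → Spec_format_sse_message data event (format_sse_message data event)

-- ===== LEMMAS AND PROOFS =====

-- structural version of data.replace("\n", "\ndata: ")
def replNl : List Char → List Char
  | [] => []
  | c :: t => if c = '\n' then '\n' :: "data: ".toList ++ replNl t else c :: replNl t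

-- structural version of data.split("\n")
def splitNl : List Char → List (List Char)
  | [] => [[]]
  | c :: t =>
    if c = '\n' then [] :: splitNl t
    else match splitNl t with
      | [] => [[c]]
      | h :: r => (c :: h) :: r

def consHead (p : List Char) : List (List Char) → List (List Char)
  | [] => [p]
  | h :: r => (p ++ h) :: r

lemma replace_go_eq :
    ∀ (fuel : Nat) (l acc : List Char), l.length ≤ fuel →
      PySem.Chars.replace.go ['\n'] ('\n' :: "data: ".toList) fuel l acc
        = acc.reverse ++ replNl l := by
  intro fuel
  induction fuel with
  | zero =>
    intro l acc h
    have : l = [] := List.eq_nil_of_length_eq_zero (Nat.le_zero.mp h)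
    subst this
    simp [PySem.Chars.replace.go, replNl]
  | succ n ih =>
    intro l acc h
    cases l with
    | nil => simp [PySem.Chars.replace.go, replNl]
    | cons c t =>
      by_cases hc : c = '\n'
      · subst hc
        rw [PySem.Chars.replace.go]
        simp only [List.isPrefixOf, replNl]
        rw [if_pos (by decide)]
        rw [ih _ _ (by simpa using Nat.lt_succ_iff.mp (by simpa using h))]
        simp
      · rw [PySem.Chars.replace.go]
        have hp : List.isPrefixOf ['\n'] (c :: t) = false := by
          simp [List.isPrefixOf]
          intro hcc
          exact absurd hcc.symm hc
        rw [hp]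
        simp only [Bool.false_eq_true, if_false]
        rw [ih _ _ (by simpa using h)]
        simp [replNl, hc]

lemma splitNl_ne_nil : ∀ (t : List Char), splitNl t ≠ [] := by
  intro t
  cases t with
  | nil => simp [splitNl]
  | cons c t =>
    by_cases hc : c = '\n'
    · simp [splitNl, hc]
    · cases hs : splitNl t <;> simp [splitNl, hc, hs]

lemma split_go_eq :
    ∀ (fuel : Nat) (l cur : List Char) (acc : List (List Char)), l.length < fuel →
      PySem.Chars.splitOn.go ['\n'] fuel l cur acc
        = acc.reverse ++ consHead cur.reverse (splitNl l) := by
  intro fuel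
  induction fuel with
  | zero => intro l cur acc h; omega
  | succ n ih =>
    intro l cur acc h
    cases l with
    | nil => simp [PySem.Chars.splitOn.go, splitNl, consHead]
    | cons c t =>
      rcases hs : splitNl t with _ | ⟨h0, r⟩
      · exact absurd hs (splitNl_ne_nil t)
      by_cases hc : c = '\n'
      · subst hc
        rw [PySem.Chars.splitOn.go]
        simp only [List.isPrefixOf]
        rw [if_pos (by decide)]
        rw [ih _ _ _ (by simpa using h)]
        simp [splitNl, hs, consHead]
      · rw [PySem.Chars.splitOn.go]
        have hp : List.isPrefixOf ['\n'] (c :: t) = false := by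
          simp [List.isPrefixOf]
          intro hcc
          exact absurd hcc.symm hc
        rw [hp]
        simp only [Bool.false_eq_true, if_false]
        rw [ih _ _ _ (by simpa using h)]
        simp [splitNl, hs, hc, consHead]

lemma foldl_consHead_splitNl :
    ∀ (t : List Char) (m p : List Char),
      (consHead p (splitNl t)).foldl
        (fun acc line => acc ++ "data: ".toList ++ line ++ ['\n']) m
        = m ++ "data: ".toList ++ p ++ replNl t ++ ['\n'] := by
  intro t
  induction t with
  | nil => intro m p; simp [splitNl, consHead, replNl]
  | cons c t ih =>
    intro m p
    rcases hs : splitNl t with _ | ⟨h0, r⟩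
    · exact absurd hs (splitNl_ne_nil t)
    by_cases hc : c = '\n'
    · subst hc
      have e1 : consHead p (splitNl ('\n' :: t)) = p :: consHead [] (splitNl t) := by
        simp [splitNl, hs, consHead]
      rw [e1, List.foldl_cons, ih]
      simp [replNl]
    · have e2 : consHead p (splitNl (c :: t)) = consHead (p ++ [c]) (splitNl t) := by
        simp [splitNl, hs, hc, consHead]
      rw [e2, ih]
      simp [replNl, hc]

-- ===== VERDICT (by name: the statement is the Claim_ definition above) =====
theorem format_sse_message_spec : Claim_equal_format_sse_message := by
  intro data event _
  unfold Spec_format_sse_message format_sse_message format_sse_message_alt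
  rw [PySem.Chars.splitOn]
  rw [split_go_eq _ _ _ _ (Nat.lt_succ_self _)]
  rw [PySem.Chars.replace]
  simp only [List.isEmpty_cons, Bool.false_eq_true, if_false]
  rw [replace_go_eq _ _ _ (Nat.le_refl _)]
  simp only [List.reverse_nil, List.nil_append]
  rw [foldl_consHead_splitNl]
  simp
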